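-- pv_equiv track=rewrite | github.com/maximakimov-84/Devops2412-WorldOfGames | MemoryGame.py | is_list_equal
-- ===== SOURCE A (Python) =====
-- def is_list_equal(list1, list2) -> bool:
--     """
--       Compares two lists of integers and returns True if all items in the first list
--       are equal to items in the second list, regardless of order.
--
--       Args:
--         list1: The first list of integers.
--         list2: The second list of integers.
--
--       Returns:
--         True if all items in list1 are equal to items in list2, False otherwise.
--       """
--
--     # Check if the lists have the same length.
--     if len(list1) != len(list2):
--         return False
--
--     # Sort both lists
--     list1_sorted = sorted(list1)
--     list2_sorted = sorted(list2)
--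
--     # Compare elements based on indices
--     for i, num in enumerate(list1_sorted):
--         if i >= len(list2_sorted) or num != list2_sorted[i]:
--             return False
--     return True
-- ===== SOURCE B (Python) =====
-- def is_list_equal(list1, list2) -> bool:
--     remaining = list(list2)
--     for x in list1:
--         try:
--             remaining.remove(x)
--         except ValueError:
--             return False
--     return not remaining
-- ===== Notes on version B (the rewrite author's own statement) =====
-- stated objective: alternative
-- what changed: Replaces the sort-both-then-index-compare algorithm with a single pass over list1 that removes each element from a mutable copy of list2, returning False on a failed remove and checking the copy is empty at the end; no sorting and no length check.
import Mathlib
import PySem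

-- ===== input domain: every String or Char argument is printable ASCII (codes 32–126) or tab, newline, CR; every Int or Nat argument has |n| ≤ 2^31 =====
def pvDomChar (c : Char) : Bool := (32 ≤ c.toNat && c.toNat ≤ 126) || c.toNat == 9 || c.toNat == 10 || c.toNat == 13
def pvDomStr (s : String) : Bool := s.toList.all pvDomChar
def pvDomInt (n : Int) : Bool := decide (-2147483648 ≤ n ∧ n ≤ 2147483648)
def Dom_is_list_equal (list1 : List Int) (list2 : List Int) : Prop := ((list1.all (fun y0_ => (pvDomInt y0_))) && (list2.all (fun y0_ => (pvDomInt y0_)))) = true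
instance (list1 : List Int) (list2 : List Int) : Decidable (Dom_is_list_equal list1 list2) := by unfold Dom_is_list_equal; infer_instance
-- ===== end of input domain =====

-- B replaces sorting-then-index-compare with a single pass over list1 that deletes each
-- element from a working copy of list2 (alternative decomposition; return value unchanged).

-- ===== PORT A =====
-- the 'for i, num in enumerate(list1_sorted)' loop, with its early return False
def pvLoopA : List (Int × Int) → List Int → Bool
  | [], _ => true
  | (i, num) :: rest, s2 =>
      if i ≥ (s2.length : Int) ∨ PySem.List.pyGet? s2 i ≠ some num then false
      else pvLoopA rest s2

def is_list_equal (list1 : List Int) (list2 : List Int) : Bool :=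
  if list1.length ≠ list2.length then false
  else
    let list1_sorted := PySem.List.sorted list1 (fun x => x) false
    let list2_sorted := PySem.List.sorted list2 (fun x => x) false
    pvLoopA (PySem.List.enumerate list1_sorted) list2_sorted

-- ===== PORT B =====
-- the 'for x in list1: remaining.remove(x)  except ValueError: return False' loop
def pvLoopB : List Int → List Int → Bool
  | [], remaining => remaining.isEmpty
  | x :: xs, remaining =>
      match PySem.List.remove? remaining x with
      | none => false
      | some r => pvLoopB xs r

def is_list_equal_alt (list1 : List Int) (list2 : List Int) : Bool :=
  pvLoopB list1 list2

-- ===== PRECONDITION & SPEC =====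
def Spec_is_list_equal (list1 : List Int) (list2 : List Int) (out : Bool) : Prop := out = is_list_equal_alt list1 list2
instance (list1 : List Int) (list2 : List Int) (out : Bool) : Decidable (Spec_is_list_equal list1 list2 out) := by unfold Spec_is_list_equal; infer_instance

-- ===== CLAIM (what is proved, stated in full; the proofs are below) =====
def Claim_equal_is_list_equal : Prop := ∀ (list1 : List Int) (list2 : List Int), Dom_is_list_equal list1 list2 → Spec_is_list_equal list1 list2 (is_list_equal list1 list2)

-- ===== LEMMAS AND PROOFS =====

-- A's index loop, started at offset k, decides whether s1 equals the tail s2.drop k.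
theorem pvLoopA_eq_decide (s1 : List Int) : ∀ (s2 : List Int) (k : Nat),
    k + s1.length = s2.length →
    pvLoopA (PySem.List.enumerate s1 (k : Int)) s2 = decide (s1 = s2.drop k) := by
  induction s1 with
  | nil =>
      intro s2 k hk
      have hd : s2.drop k = [] := List.drop_eq_nil_iff.mpr (by simp at hk; omega)
      simp [PySem.List.enumerate_nil, pvLoopA, hd]
  | cons x xs ih =>
      intro s2 k hk
      have hklt : k < s2.length := by simp at hk; omega
      rw [PySem.List.enumerate_cons, pvLoopA]
      have hget : PySem.List.pyGet? s2 (k : Int) = some s2[k] := by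
        rw [PySem.List.pyGet?_natCast]; exact List.getElem?_eq_getElem hklt
      have hdrop : s2.drop k = s2[k] :: s2.drop (k + 1) := List.drop_eq_getElem_cons hklt
      rw [hget, hdrop]
      by_cases hx : s2[k] = x
      · rw [if_neg]
        · have hcast : ((k : Int) + 1) = ((k + 1 : Nat) : Int) := by push_cast; ring
          rw [hcast, ih s2 (k + 1) (by simp at hk ⊢; omega)]
          rw [hx]
          simp
        · push Not
          refine ⟨by exact_mod_cast hklt, by rw [hx]⟩
      · rw [if_pos (Or.inr (fun h => hx (Option.some.inj h)))]
        symm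
        simp only [decide_eq_false_iff_not]
        intro h
        rw [List.cons.injEq] at h
        exact hx h.1.symm

-- A returns true exactly on permutations (sorted lists are equal iff the lists are permutations).
theorem is_list_equal_iff_perm (l1 l2 : List Int) :
    is_list_equal l1 l2 = true ↔ l1.Perm l2 := by
  unfold is_list_equal
  by_cases hlen : l1.length = l2.length
  · simp only [hlen, ne_eq, not_true_eq_false, if_false]
    show pvLoopA (PySem.List.enumerate (PySem.List.sorted l1 (fun x => x) false))
        (PySem.List.sorted l2 (fun x => x) false) = true ↔ l1.Perm l2
    have hslen : 0 + (PySem.List.sorted l1 (fun x => x) false).length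
        = (PySem.List.sorted l2 (fun x => x) false).length := by
      rw [PySem.List.length_sorted, PySem.List.length_sorted]; omega
    have h := pvLoopA_eq_decide (PySem.List.sorted l1 (fun x => x) false)
      (PySem.List.sorted l2 (fun x => x) false) 0 hslen
    simp only [Nat.cast_zero, List.drop_zero] at h
    rw [h]
    simp only [decide_eq_true_eq]
    exact PySem.List.sorted_id_eq_sorted_id_iff_perm l1 l2
  · simp only [ne_eq, hlen, not_false_eq_true, if_true, Bool.false_eq_true, false_iff]
    exact fun hp => hlen hp.length_eq

-- B's delete loop returns true exactly when list1 is a permutation of the remaining pool.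
theorem pvLoopB_iff_perm (l1 : List Int) : ∀ (rem : List Int),
    pvLoopB l1 rem = true ↔ l1.Perm rem := by
  induction l1 with
  | nil =>
      intro rem
      simp only [pvLoopB, List.isEmpty_iff]
      constructor
      · intro h; rw [h]
      · intro h; exact h.symm.eq_nil
  | cons x xs ih =>
      intro rem
      rw [pvLoopB]
      by_cases hmem : x ∈ rem
      · rw [PySem.List.remove?_eq_some_erase rem x hmem]
        show pvLoopB xs (rem.erase x) = true ↔ (x :: xs).Perm rem
        rw [ih (rem.erase x), List.cons_perm_iff_perm_erase]
        simp [hmem]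
      · rw [Iff.mpr (PySem.List.remove?_eq_none_iff rem x) hmem]
        show false = true ↔ (x :: xs).Perm rem
        simp only [Bool.false_eq_true, false_iff]
        intro hp
        exact hmem (hp.subset (by simp))

-- ===== VERDICT (by name: the statement is the Claim_ definition above) =====
theorem is_list_equal_spec : Claim_equal_is_list_equal := by
  intro l1 l2 _
  unfold Spec_is_list_equal is_list_equal_alt
  rw [Bool.eq_iff_iff, is_list_equal_iff_perm, pvLoopB_iff_perm]
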